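-- pv_equiv track=rewrite | github.com/MRU-W23-CS1/sample-code | lecture17/sarcastic_text.py | to_sarcastic_chatgpt
-- ===== SOURCE A (Python) =====
-- def to_sarcastic_chatgpt(txt: str) -> str:
--     """
--     Converts regular text into sarcastic text
--     """
--     sarcastic_text = ""
--     is_upper = True  # Start with uppercase letter
--     for c in txt:
--         if c.isalpha():
--             if is_upper:
--                 sarcastic_text += c.upper()
--             else:
--                 sarcastic_text += c.lower()
--             is_upper = not is_upper
--         else:
--             sarcastic_text += c
--     return sarcastic_text
-- ===== SOURCE B (Python) =====
-- def to_sarcastic_chatgpt(txt: str) -> str: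
--     """
--     Converts regular text into sarcastic text.
--     Two passes: first pre-case the alphabetic characters by their parity
--     among the letters, then interleave them back with the non-letters.
--     """
--     letters = iter(c.upper() if i % 2 == 0 else c.lower()
--                    for i, c in enumerate(filter(str.isalpha, txt)))
--     return "".join(next(letters) if c.isalpha() else c for c in txt)
-- ===== Notes on version B (the rewrite author's own statement) =====
-- stated objective: alternative
-- what changed: Replaces A's single stateful toggle loop by two separate passes: first pre-case the filtered alphabetic characters by index parity (even -> upper, odd -> lower), then a second pass over txt that interleaves the pre-cased letters back among the non-letter characters.
import Mathlib
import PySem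

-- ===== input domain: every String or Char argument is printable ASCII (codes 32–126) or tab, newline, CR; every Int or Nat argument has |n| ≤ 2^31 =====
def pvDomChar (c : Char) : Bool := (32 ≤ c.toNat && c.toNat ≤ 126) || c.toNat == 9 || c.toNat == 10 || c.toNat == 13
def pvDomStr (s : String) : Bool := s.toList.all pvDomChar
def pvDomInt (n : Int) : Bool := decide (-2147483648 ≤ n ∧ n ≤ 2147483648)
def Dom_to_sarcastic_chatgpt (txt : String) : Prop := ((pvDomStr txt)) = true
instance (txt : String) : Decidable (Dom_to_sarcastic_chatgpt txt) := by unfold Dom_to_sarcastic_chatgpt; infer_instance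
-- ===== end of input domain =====

-- B replaces A's one stateful upper/lower toggle loop by two passes: pre-case the
-- filtered letters by index parity, then interleave them back with the non-letters.

-- ===== PORT A =====
-- literal transliteration: accumulate the output and toggle is_upper in one fold over txt
def to_sarcastic_chatgpt (txt : String) : String :=
  String.mk (txt.toList.foldl (fun (st : List Char × Bool) c =>
    if PySem.Chars.isalpha c then
      ((st.1 ++ [if st.2 then PySem.Chars.upperChar c else PySem.Chars.lowerChar c]), !st.2)
    else (st.1 ++ [c], st.2)) ([], true)).1

-- ===== PORT B =====
-- pass 1: enumerate the alphabetic characters and case them by index parity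
def sarcLetters (cs : List Char) : List Char :=
  (PySem.List.enumerate (cs.filter PySem.Chars.isalpha)).map
    (fun p => if PySem.Int.mod p.1 2 == 0 then PySem.Chars.upperChar p.2
              else PySem.Chars.lowerChar p.2)

-- pass 2: emit the next pre-cased letter for each alphabetic char, copy others
-- (the empty-iterator branch is unreachable: there is one pre-cased letter per alpha char)
def sarcEmit : List Char → List Char → List Char
  | [], _ => []
  | c :: cs, ls =>
    if PySem.Chars.isalpha c then
      match ls with
      | l :: ls' => l :: sarcEmit cs ls'
      | [] => c :: sarcEmit cs []
    else c :: sarcEmit cs ls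

def to_sarcastic_chatgpt_alt (txt : String) : String :=
  String.mk (sarcEmit txt.toList (sarcLetters txt.toList))

-- ===== PRECONDITION & SPEC =====
def Spec_to_sarcastic_chatgpt (txt : String) (out : String) : Prop := out = to_sarcastic_chatgpt_alt txt
instance (txt : String) (out : String) : Decidable (Spec_to_sarcastic_chatgpt txt out) := by unfold Spec_to_sarcastic_chatgpt; infer_instance

-- ===== CLAIM (what is proved, stated in full; the proofs are below) =====
def Claim_equal_to_sarcastic_chatgpt : Prop := ∀ (txt : String), Dom_to_sarcastic_chatgpt txt → Spec_to_sarcastic_chatgpt txt (to_sarcastic_chatgpt txt)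

-- ===== LEMMAS AND PROOFS =====

-- the common reference recursion: case each letter by the current toggle
def sarcRef : List Char → Bool → List Char
  | [], _ => []
  | c :: cs, up =>
    if PySem.Chars.isalpha c then
      (if up then PySem.Chars.upperChar c else PySem.Chars.lowerChar c) :: sarcRef cs (!up)
    else c :: sarcRef cs up

-- pre-cased letters of a pure letter list, as the toggle recursion
def sarcCase : List Char → Bool → List Char
  | [], _ => []
  | l :: ls, up =>
    (if up then PySem.Chars.upperChar l else PySem.Chars.lowerChar l) :: sarcCase ls (!up)

lemma foldlA_eq_sarcRef (cs : List Char) (acc : List Char) (up : Bool) :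
    (cs.foldl (fun (st : List Char × Bool) c =>
      if PySem.Chars.isalpha c then
        ((st.1 ++ [if st.2 then PySem.Chars.upperChar c else PySem.Chars.lowerChar c]), !st.2)
      else (st.1 ++ [c], st.2)) (acc, up)).1 = acc ++ sarcRef cs up := by
  induction cs generalizing acc up with
  | nil => simp [sarcRef]
  | cons c cs ih =>
    by_cases h : PySem.Chars.isalpha c <;>
      simp [List.foldl, sarcRef, h, ih]

lemma enumMap_eq_sarcCase (ls : List Char) (n : Int) :
    (PySem.List.enumerate ls n).map
      (fun p => if PySem.Int.mod p.1 2 == 0 then PySem.Chars.upperChar p.2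
                else PySem.Chars.lowerChar p.2)
      = sarcCase ls (PySem.Int.mod n 2 == 0) := by
  induction ls generalizing n with
  | nil => simp [PySem.List.enumerate, sarcCase]
  | cons l ls ih =>
    have hpar : (PySem.Int.mod (n + 1) 2 == 0) = !(PySem.Int.mod n 2 == 0) := by
      have hm : PySem.Int.mod n 2 = n % 2 := PySem.Int.mod_eq_emod_of_pos (by norm_num)
      have hm1 : PySem.Int.mod (n + 1) 2 = (n + 1) % 2 := PySem.Int.mod_eq_emod_of_pos (by norm_num)
      rw [hm, hm1]
      rcases Int.emod_two_eq n with h | h <;> simp [h] <;> omega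
    rw [show PySem.List.enumerate (l :: ls) n = (n, l) :: PySem.List.enumerate ls (n + 1) from rfl,
        List.map_cons, ih (n + 1), hpar]
    simp [sarcCase]

lemma sarcEmit_sarcCase (cs : List Char) (up : Bool) :
    sarcEmit cs (sarcCase (cs.filter PySem.Chars.isalpha) up) = sarcRef cs up := by
  induction cs generalizing up with
  | nil => simp [sarcEmit, sarcRef]
  | cons c cs ih =>
    by_cases h : PySem.Chars.isalpha c <;>
      simp [sarcEmit, sarcRef, sarcCase, h, ih]

-- ===== VERDICT (by name: the statement is the Claim_ definition above) =====
theorem to_sarcastic_chatgpt_spec : Claim_equal_to_sarcastic_chatgpt := by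
  intro txt _
  unfold Spec_to_sarcastic_chatgpt to_sarcastic_chatgpt to_sarcastic_chatgpt_alt sarcLetters
  rw [foldlA_eq_sarcRef, enumMap_eq_sarcCase, sarcEmit_sarcCase]
  simp
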